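-- pv_equiv track=rewrite | github.com/lokeshvelayudham/DataStructureAlgorathim-in-Python | dataStructures/recursionAssignment/checkAB.py | checkAB
-- ===== SOURCE A (Python) =====
-- def checkAB(s):
--     if len(s) == 0:
--         return True
--     if (s[0] == 'a'):
--         if ( len(s[1:]) > 1 and s[1:3] == 'bb'):
--             return checkAB(s[3:])
--         else:
--             return checkAB(s[1:])
-- ===== SOURCE B (Python) =====
-- def checkAB(s):
--     # single index-pointer scan instead of recursive slicing
--     i, n = 0, len(s)
--     while i < n:
--         if s[i] != 'a':
--             return None
--         if s.startswith('bb', i + 1):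
--             i += 3
--         else:
--             i += 1
--     return True
-- ===== Notes on version B (the rewrite author's own statement) =====
-- stated objective: faster
-- what changed: replaces the recursive slicing (each step copies the remaining string) with an iterative single index-pointer scan
import Mathlib
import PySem

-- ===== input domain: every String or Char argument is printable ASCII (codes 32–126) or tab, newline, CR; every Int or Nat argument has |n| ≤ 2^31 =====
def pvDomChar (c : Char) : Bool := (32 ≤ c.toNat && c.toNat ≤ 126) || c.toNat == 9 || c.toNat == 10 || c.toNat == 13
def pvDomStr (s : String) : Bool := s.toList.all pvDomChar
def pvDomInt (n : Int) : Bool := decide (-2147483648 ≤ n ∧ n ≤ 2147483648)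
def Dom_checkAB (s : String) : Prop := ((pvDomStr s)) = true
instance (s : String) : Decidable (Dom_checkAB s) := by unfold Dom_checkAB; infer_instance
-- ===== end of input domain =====

-- B replaces A's recursive slicing with an iterative single index-pointer scan; equivalence of the return values is proved below.

-- ===== PORT A =====
-- A, step for step on the code points: empty → True; leading 'a' → recurse on s[3:] when s[1:] is longer
-- than 1 and s[1:3] == 'bb', else on s[1:]; otherwise fall off (None).
def checkABGo (l : List Char) : Option Bool :=
  if l.length = 0 then some true
  else if PySem.List.pyGet? l 0 = some 'a' then
    if (PySem.List.slice l (some 1) none).length > 1 ∧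
        PySem.List.slice l (some 1) (some 3) = ['b', 'b'] then
      checkABGo (PySem.List.slice l (some 3) none)
    else
      checkABGo (PySem.List.slice l (some 1) none)
  else none
termination_by l.length
decreasing_by
  · rw [PySem.List.slice_from l (by norm_num : (0:Int) ≤ 3)]; simp; omega
  · rw [PySem.List.slice_from l (by norm_num : (0:Int) ≤ 1)]; simp; omega

def checkAB (s : String) : Option Bool := checkABGo s.toList

-- ===== PORT B =====
-- B's pointer scan: the index i is represented by the remaining suffix of the char list;
-- s.startswith('bb', i+1) is the check that the suffix after the 'a' begins with 'b','b'.
def checkABScan (l : List Char) : Option Bool :=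
  match l with
  | [] => some true
  | c :: rest =>
    if c ≠ 'a' then none
    else
      match _h : rest with
      | 'b' :: 'b' :: r => checkABScan r
      | _ => checkABScan rest
termination_by l.length
decreasing_by all_goals (try subst_vars); all_goals simp; all_goals omega

def checkAB_alt (s : String) : Option Bool := checkABScan s.toList

-- ===== PRECONDITION & SPEC =====
def Spec_checkAB (s : String) (out : Option Bool) : Prop := out = checkAB_alt s
instance (s : String) (out : Option Bool) : Decidable (Spec_checkAB s out) := by unfold Spec_checkAB; infer_instance

-- ===== CLAIM (what is proved, stated in full; the proofs are below) =====
def Claim_equal_checkAB : Prop := ∀ (s : String), Dom_checkAB s → Spec_checkAB s (checkAB s)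

-- ===== LEMMAS AND PROOFS =====
theorem scan_not_a (c : Char) (rest : List Char) (h : ¬ c = 'a') :
    checkABScan (c :: rest) = none := by
  rw [checkABScan.eq_def]
  split
  · next heq => exact absurd heq (by simp)
  · next c' rest' heq =>
    injection heq with h1 h2
    subst h1; subst h2
    rw [if_pos h]

theorem scan_bb (r : List Char) : checkABScan ('a' :: 'b' :: 'b' :: r) = checkABScan r := by
  rw [checkABScan.eq_def]
  split
  · next heq => exact absurd heq (by simp)
  · next c' rest' heq =>
    injection heq with h1 h2
    subst h1; subst h2
    rw [if_neg (by simp)]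
    split
    · next r' heq2 =>
      obtain rfl : r = r' := by simpa using heq2
      rfl
    · next hne => exact absurd rfl (hne r)

theorem scan_a (rest : List Char) (h : ¬(1 < rest.length ∧ rest.take 2 = ['b', 'b'])) :
    checkABScan ('a' :: rest) = checkABScan rest := by
  rw [checkABScan.eq_def]
  split
  · next heq => exact absurd heq (by simp)
  · next c' rest' heq =>
    injection heq with h1 h2
    subst h1; subst h2
    rw [if_neg (by simp)]
    split
    · next r'' => exact absurd ⟨by simp, by simp⟩ h
    · rfl

theorem checkABGo_eq_scan (l : List Char) : checkABGo l = checkABScan l := by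
  induction l using checkABGo.induct with
  | case1 l h =>
    rw [checkABGo, if_pos h]
    rw [List.length_eq_zero_iff] at h
    subst h
    rw [checkABScan]
  | case2 l h0 ha hcond ih =>
    rw [checkABGo, if_neg h0, if_pos ha, if_pos hcond, ih]
    rcases l with _ | ⟨c, rest⟩
    · simp at h0
    · simp at ha
      subst ha
      rw [PySem.List.slice_from _ (by norm_num : (0:Int) ≤ 1),
        PySem.List.slice_toNat _ (by norm_num : (0:Int) ≤ 1) (by norm_num : (0:Int) ≤ 3)] at hcond
      simp at hcond
      obtain ⟨hlen, htake⟩ := hcond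
      match rest, hlen, htake with
      | x :: y :: r, _, htake =>
        simp at htake
        obtain ⟨rfl, rfl⟩ := htake
        rw [PySem.List.slice_from _ (by norm_num : (0:Int) ≤ 3), scan_bb]
        rfl
  | case3 l h0 ha hcond ih =>
    rw [checkABGo, if_neg h0, if_pos ha, if_neg hcond, ih]
    rcases l with _ | ⟨c, rest⟩
    · simp at h0
    · simp at ha
      subst ha
      rw [PySem.List.slice_from _ (by norm_num : (0:Int) ≤ 1),
        PySem.List.slice_toNat _ (by norm_num : (0:Int) ≤ 1) (by norm_num : (0:Int) ≤ 3)] at hcond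
      rw [PySem.List.slice_from _ (by norm_num : (0:Int) ≤ 1)]
      simp at hcond ⊢
      rw [scan_a rest (by simpa using hcond)]
  | case4 l h0 ha =>
    rcases l with _ | ⟨c, rest⟩
    · simp at h0
    · simp at ha
      rw [checkABGo, if_neg h0, if_neg (by simpa [PySem.List.pyGet?_zero_cons] using ha),
        scan_not_a c rest ha]

-- ===== VERDICT (by name: the statement is the Claim_ definition above) =====
theorem checkAB_spec : Claim_equal_checkAB := by
  intro s _
  unfold Spec_checkAB checkAB checkAB_alt
  exact checkABGo_eq_scan s.toList
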